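-- pv_equiv track=rewrite | github.com/AndresitOort/Cachimbo | Nueva carpeta/Tarea Senecode 4.py | producto_mas_barato
-- ===== SOURCE A (Python) =====
-- def producto_mas_barato(catalogo:dict)->str:
--
--     masBarato=10000000000000
--     articulo=""
--
--     if catalogo=={}:
--         return "No hay productos para escoger"
--
--     for i in catalogo.keys():
--
--         if catalogo[i]<masBarato:
--             masBarato=catalogo[i]
--             articulo=i
--
--         elif catalogo[i]==masBarato:
--             articulo=min(i,articulo)
--
--     if masBarato>10000:
--         return None
--
--     return articulo
-- ===== SOURCE B (Python) =====
-- def producto_mas_barato(catalogo: dict) -> str: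
--     if not catalogo:
--         return "No hay productos para escoger"
--     articulo, masBarato = sorted(catalogo.items(), key=lambda kv: (kv[1], kv[0]))[0]
--     if masBarato > 10000:
--         return None
--     return articulo
-- ===== Notes on version B (the rewrite author's own statement) =====
-- stated objective: simpler
-- what changed: Replaces the hand-written running-minimum loop with its sentinel price and empty-string tie accumulator by a single sort of the items under the composite key (price, name) and taking the first entry.
import Mathlib
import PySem

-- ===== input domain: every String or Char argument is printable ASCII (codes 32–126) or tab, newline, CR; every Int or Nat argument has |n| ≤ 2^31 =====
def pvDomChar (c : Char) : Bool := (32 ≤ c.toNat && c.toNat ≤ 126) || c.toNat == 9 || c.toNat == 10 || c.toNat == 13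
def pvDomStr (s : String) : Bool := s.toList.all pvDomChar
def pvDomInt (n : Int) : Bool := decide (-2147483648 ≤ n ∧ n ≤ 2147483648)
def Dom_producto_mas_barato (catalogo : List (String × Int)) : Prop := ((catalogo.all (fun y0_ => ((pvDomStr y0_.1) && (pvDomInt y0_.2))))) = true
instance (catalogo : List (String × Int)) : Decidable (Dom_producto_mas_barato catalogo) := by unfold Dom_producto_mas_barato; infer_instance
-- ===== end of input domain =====

-- B replaces A's running-minimum loop (sentinel price, empty-string tie accumulator) by one sort
-- of the items under the composite key (price, name) and taking the first entry; same guards.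

-- ===== PORT A =====
-- literal transliteration of A; catalogo[i] inside the loop is ported as getD (i is always a key, so
-- Python's KeyError is impossible here)
def producto_mas_barato (catalogo : List (String × Int)) : Option String :=
  let d := PySem.Dict.ofList catalogo
  let masBarato : Int := 10000000000000
  let articulo : String := ""
  if d.items = [] then
    some "No hay productos para escoger"
  else
    let st := d.keys.foldl (fun (s : Int × String) i =>
      if d.getD i 0 < s.1 then (d.getD i 0, i)
      else if d.getD i 0 = s.1 then (s.1, min i s.2)
      else s) (masBarato, articulo)
    if st.1 > 10000 then none else some st.2

-- ===== PORT B =====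
def producto_mas_barato_alt (catalogo : List (String × Int)) : Option String :=
  let d := PySem.Dict.ofList catalogo
  if d.items = [] then
    some "No hay productos para escoger"
  else
    match PySem.List.sorted2 d.items (fun kv => kv.2) (fun kv => kv.1) with
    | [] => none   -- unreachable: sorting a nonempty list is nonempty
    | kv :: _ => if kv.2 > 10000 then none else some kv.1

-- ===== PRECONDITION & SPEC =====
def Spec_producto_mas_barato (catalogo : List (String × Int)) (out : Option String) : Prop := out = producto_mas_barato_alt catalogo
instance (catalogo : List (String × Int)) (out : Option String) : Decidable (Spec_producto_mas_barato catalogo out) := by unfold Spec_producto_mas_barato; infer_instance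

-- ===== CLAIM (what is proved, stated in full; the proofs are below) =====
def Claim_equal_producto_mas_barato : Prop := ∀ (catalogo : List (String × Int)), Dom_producto_mas_barato catalogo → Spec_producto_mas_barato catalogo (producto_mas_barato catalogo)

-- ===== LEMMAS AND PROOFS =====

-- the lex key under which both programs compare items: (price, name)
def pvLexKey (p : String × Int) : Int ×ₗ String := toLex (p.2, p.1)

-- every item of dict(catalogo) is an element of the input list (overwrites reuse later pairs)
theorem pv_mem_items_foldl_insert (l : List (String × Int)) (d : PySem.Dict String Int) :
    ∀ p ∈ (l.foldl (fun d x => d.insert x.1 x.2) d).items, p ∈ d.items ∨ p ∈ l := by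
  induction l generalizing d with
  | nil => intro p hp; exact Or.inl hp
  | cons x t ih =>
    intro p hp
    rcases ih (d.insert x.1 x.2) p hp with h | h
    · rcases (PySem.Dict.mem_items_insert d x.1 x.2 p).1 h with h' | ⟨h', _⟩
      · exact Or.inr (by simp [h'])
      · exact Or.inl h'
    · exact Or.inr (List.mem_cons_of_mem _ h)

theorem pv_mem_items_ofList {l : List (String × Int)} {p : String × Int}
    (h : p ∈ (PySem.Dict.ofList l).items) : p ∈ l := by
  rcases pv_mem_items_foldl_insert l PySem.Dict.empty p h with h' | h'
  · simp [PySem.Dict.empty] at h'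
  · exact h'

-- sorted2 under (price, name) is sorted under the lex key
theorem pv_sorted2_eq_sorted (l : List (String × Int)) :
    PySem.List.sorted2 l (fun kv => kv.2) (fun kv => kv.1)
      = PySem.List.sorted l pvLexKey := by
  unfold PySem.List.sorted2 PySem.List.sorted
  show l.foldl (fun acc x => PySem.List.insertBy
        (fun a b => decide (a.2 < b.2) || (!decide (b.2 < a.2) && decide (a.1 < b.1))) x acc) []
      = l.foldl (fun acc x => PySem.List.insertBy
        (fun a b => decide (pvLexKey a < pvLexKey b)) x acc) []
  refine PySem.List.foldl_congr_mem _ _ _ _ ?_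
  intro acc x _
  congr 1
  funext a b
  rcases lt_trichotomy a.2 b.2 with h | h | h
  · simp [pvLexKey, Prod.Lex.lt_iff, h]
  · simp [pvLexKey, Prod.Lex.lt_iff, h]
  · have h1 : ¬ a.2 < b.2 := asymm h
    have h2 : a.2 ≠ b.2 := ne_of_gt h
    simp [pvLexKey, Prod.Lex.lt_iff, h, h1, h2]

-- A's loop body is the lex minimum of the state and the current item
theorem pv_step_eq_min (s : Int × String) (p : String × Int) :
    (if p.2 < s.1 then (p.2, p.1)
     else if p.2 = s.1 then (s.1, min p.1 s.2)
     else s)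
      = ofLex (min (toLex (s.1, s.2)) (pvLexKey p)) := by
  rcases lt_trichotomy p.2 s.1 with h | h | h
  · have hxy : ¬ ((toLex (s.1, s.2) : Int ×ₗ String) ≤ pvLexKey p) := by
      rw [pvLexKey, Prod.Lex.le_iff]
      simp only [ofLex_toLex, not_or, not_and]
      exact ⟨asymm h, fun he => absurd he (ne_of_gt h)⟩
    rw [if_pos h, min_eq_right (le_of_lt (not_le.1 hxy))]
    rfl
  · have hlt : ¬ p.2 < s.1 := by rw [h]; exact lt_irrefl _
    rcases le_or_gt s.2 p.1 with h2 | h2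
    · have hxy : ((toLex (s.1, s.2) : Int ×ₗ String) ≤ pvLexKey p) := by
        rw [pvLexKey, Prod.Lex.le_iff]; simp only [ofLex_toLex]; exact Or.inr ⟨h.symm, h2⟩
      rw [if_neg hlt, if_pos h, min_eq_right h2, min_eq_left hxy]
      rfl
    · have hxy : (pvLexKey p ≤ (toLex (s.1, s.2) : Int ×ₗ String)) := by
        rw [pvLexKey, Prod.Lex.le_iff]; simp only [ofLex_toLex]; exact Or.inr ⟨h, h2.le⟩
      rw [if_neg hlt, if_pos h, min_eq_left h2.le, min_eq_right hxy]
      simp [pvLexKey, h]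
  · have hxy : ((toLex (s.1, s.2) : Int ×ₗ String) ≤ pvLexKey p) := by
      rw [pvLexKey, Prod.Lex.le_iff]; simp only [ofLex_toLex]; exact Or.inl h
    rw [if_neg (asymm h), if_neg (ne_of_gt h), min_eq_left hxy]
    rfl

-- A's fold is a running lex minimum
theorem pv_foldl_eq_min (l : List (String × Int)) (s : Int × String) :
    l.foldl (fun (s : Int × String) p =>
        if p.2 < s.1 then (p.2, p.1)
        else if p.2 = s.1 then (s.1, min p.1 s.2)
        else s) s
      = ofLex ((l.map pvLexKey).foldl min (toLex (s.1, s.2))) := by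
  induction l generalizing s with
  | nil => rfl
  | cons p t ih =>
    simp only [List.foldl_cons, List.map_cons]
    rw [pv_step_eq_min, ih]
    rfl

-- ===== VERDICT (by name: the statement is the Claim_ definition above) =====
theorem producto_mas_barato_spec : Claim_equal_producto_mas_barato := by
  intro catalogo hdom
  unfold Spec_producto_mas_barato producto_mas_barato producto_mas_barato_alt
  simp only []
  set d := PySem.Dict.ofList catalogo with hd
  by_cases hne : d.items = []
  · simp [hne]
  · simp only [hne, if_false]
    rw [pv_sorted2_eq_sorted]
    rcases hs : PySem.List.sorted d.items pvLexKey with _ | ⟨m, t⟩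
    · exact absurd ((PySem.List.sorted_eq_nil_iff _ _ _).1 hs) hne
    · have hmmem : m ∈ d.items := (PySem.List.sorted_perm d.items pvLexKey false).mem_iff.1 (hs ▸ List.mem_cons_self)
      have hmle : ∀ y ∈ d.items, pvLexKey m ≤ pvLexKey y := PySem.List.key_head_sorted_le d.items pvLexKey hs
      -- rewrite A's fold over keys as a fold over items
      have hkeys : d.keys = d.items.map Prod.fst := rfl
      rw [hkeys, List.foldl_map]
      rw [PySem.List.foldl_congr_mem _ _
        (fun (s : Int × String) (p : String × Int) =>
          if p.2 < s.1 then (p.2, p.1)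
          else if p.2 = s.1 then (s.1, min p.1 s.2)
          else s) _
        (by
          intro acc p hp
          have hget : d.getD p.1 0 = p.2 :=
            PySem.Dict.getD_of_mem_items d (by simpa using hp) (hd ▸ PySem.Dict.nodup_keys_ofList catalogo) 0
          simp [hget])]
      rw [pv_foldl_eq_min]
      -- the running minimum starting at the sentinel equals the sorted head's key
      set r := (d.items.map pvLexKey).foldl min (toLex ((10000000000000 : Int), ("" : String))) with hr
      have hle := PySem.List.foldl_min_le (d.items.map pvLexKey) (toLex ((10000000000000 : Int), ("" : String)))
      have hrlekm : r ≤ pvLexKey m := hle.2 _ (List.mem_map_of_mem hmmem)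
      have hrmem : r ∈ d.items.map pvLexKey := by
        rcases PySem.List.foldl_min_mem (d.items.map pvLexKey) (toLex ((10000000000000 : Int), ("" : String))) with h | h
        · exfalso
          have hbound : m.2 ≤ 2147483648 := by
            have := pv_mem_items_ofList hmmem
            have := List.all_eq_true.1 hdom _ this
            simp [pvDomInt] at this
            exact this.2.2
          rw [hr, h] at hrlekm
          rcases Prod.Lex.le_iff.1 hrlekm with h' | ⟨h', _⟩ <;>
            simp only [pvLexKey, ofLex_toLex] at h' <;> omega
        · exact h
      have hkmler : pvLexKey m ≤ r := by
        rcases List.mem_map.1 hrmem with ⟨q, hq, hqr⟩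
        rw [← hqr]
        exact hmle q hq
      have hreq : r = pvLexKey m := le_antisymm hrlekm hkmler
      rw [hreq]
      simp [pvLexKey]
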